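-- pv_equiv track=rewrite | github.com/withsivram/hc-tap | services/etl/rule_extract.py | compute_history_cutoff
-- ===== SOURCE A (Python) =====
-- def compute_history_cutoff(text: str) -> int:
--     lower = text.lower()
--     markers = [
--         "past medical history",
--         "medical history",
--         "pmh",
--         "family history",
--         "social history",
--         "history of present illness",
--         "review of systems",
--         "ros:",
--     ]
--     indices = [lower.find(marker) for marker in markers if lower.find(marker) != -1]
--     return min(indices) if indices else -1
-- ===== SOURCE B (Python) =====
-- def compute_history_cutoff(text: str) -> int:
--     markers = (
--         "past medical history",
--         "medical history",
--         "pmh",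
--         "family history",
--         "social history",
--         "history of present illness",
--         "review of systems",
--         "ros:",
--     )
--     lower = text.lower()
--     for i in range(len(lower)):
--         if lower.startswith(markers, i):
--             return i
--     return -1
-- ===== Notes on version B (the rewrite author's own statement) =====
-- stated objective: alternative
-- what changed: B makes a single left-to-right scan of the lowered text and returns the first position at which any marker starts (str.startswith with a tuple), instead of running eight separate str.find passes and taking the min of the hit indices.
import Mathlib
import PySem

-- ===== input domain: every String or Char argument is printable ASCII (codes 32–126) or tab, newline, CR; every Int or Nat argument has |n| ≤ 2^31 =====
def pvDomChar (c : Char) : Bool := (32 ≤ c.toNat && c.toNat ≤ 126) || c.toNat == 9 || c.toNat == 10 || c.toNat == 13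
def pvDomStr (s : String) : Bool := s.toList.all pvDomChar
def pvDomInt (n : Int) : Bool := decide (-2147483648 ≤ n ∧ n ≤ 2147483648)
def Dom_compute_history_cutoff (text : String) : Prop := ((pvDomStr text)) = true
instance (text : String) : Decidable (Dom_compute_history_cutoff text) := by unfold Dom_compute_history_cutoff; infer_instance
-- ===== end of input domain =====

-- B replaces A's eight separate find passes + min by a single left-to-right scan
-- returning the first position where any marker starts (alternative, not claimed faster).

-- ===== PORT A =====
def pvMarkersA : List String :=
  ["past medical history", "medical history", "pmh", "family history",
   "social history", "history of present illness", "review of systems", "ros:"]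

def compute_history_cutoff (text : String) : Int :=
  let lower := PySem.Str.lower text
  let indices := (pvMarkersA.filter (fun m => PySem.Str.find lower m != -1)).map
      (fun m => PySem.Str.find lower m)
  match PySem.List.min? indices (fun x => x) with
  | some v => v
  | none => -1

-- ===== PORT B =====
def pvMarkersB : List String :=
  ["past medical history", "medical history", "pmh", "family history",
   "social history", "history of present illness", "review of systems", "ros:"]

-- the 'for i in range(len(lower)): if lower.startswith(markers, i): return i' loop
def pvScanB (ms : List (List Char)) : Nat → List Char → Int
  | _, [] => -1
  | i, c :: rest =>
      if ms.any (fun m => PySem.Chars.startswith (c :: rest) m) then (i : Int)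
      else pvScanB ms (i + 1) rest

def compute_history_cutoff_alt (text : String) : Int :=
  pvScanB (pvMarkersB.map String.toList) 0 (PySem.Chars.lower text.toList)

-- ===== PRECONDITION & SPEC =====
def Spec_compute_history_cutoff (text : String) (out : Int) : Prop := out = compute_history_cutoff_alt text
instance (text : String) (out : Int) : Decidable (Spec_compute_history_cutoff text out) := by unfold Spec_compute_history_cutoff; infer_instance

-- ===== CLAIM (what is proved, stated in full; the proofs are below) =====
def Claim_equal_compute_history_cutoff : Prop := ∀ (text : String), Dom_compute_history_cutoff text → Spec_compute_history_cutoff text (compute_history_cutoff text)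

-- ===== LEMMAS AND PROOFS =====

-- "some marker starts at position j of s"
def pvQ (ms : List (List Char)) (s : List Char) (j : Nat) : Prop :=
  ∃ m ∈ ms, m <+: s.drop j

lemma pvQ_iff_any (ms : List (List Char)) (t : List Char) :
    (ms.any (fun m => PySem.Chars.startswith t m)) = true ↔ ∃ m ∈ ms, m <+: t := by
  simp [List.any_eq_true, PySem.Chars.startswith_iff]

lemma pvScanB_neg (ms : List (List Char)) :
    ∀ (s : List Char) (i : Nat), (∀ j, ¬ pvQ ms s j) → pvScanB ms i s = -1 := by
  intro s
  induction s with
  | nil => intro i _; rfl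
  | cons c rest ih =>
      intro i h
      have h0 : ¬ pvQ ms (c :: rest) 0 := h 0
      have hany : (ms.any (fun m => PySem.Chars.startswith (c :: rest) m)) = false := by
        rcases Bool.eq_false_or_eq_true (ms.any (fun m => PySem.Chars.startswith (c :: rest) m)) with ht | hf
        · exact absurd ((pvQ_iff_any ms (c :: rest)).mp ht) (by simpa [pvQ] using h0)
        · exact hf
      simp only [pvScanB, hany, Bool.false_eq_true, if_false]
      exact ih (i + 1) (fun j => by simpa [pvQ] using h (j + 1))

lemma pvScanB_pos (ms : List (List Char)) :
    ∀ (s : List Char) (i j0 : Nat), pvQ ms s j0 → (∀ j < j0, ¬ pvQ ms s j) →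
      (¬ ∃ m ∈ ms, m <+: ([] : List Char)) → pvScanB ms i s = (i : Int) + (j0 : Int) := by
  intro s
  induction s with
  | nil =>
      intro i j0 hq _ hnil
      exact absurd (by simpa [pvQ] using hq) hnil
  | cons c rest ih =>
      intro i j0 hq hmin hnil
      by_cases h0 : pvQ ms (c :: rest) 0
      · have j0z : j0 = 0 := by
          by_contra hne
          exact hmin 0 (Nat.pos_of_ne_zero (fun h => hne h)) h0
        have hany : (ms.any (fun m => PySem.Chars.startswith (c :: rest) m)) = true :=
          (pvQ_iff_any ms (c :: rest)).mpr (by simpa [pvQ] using h0)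
        simp [pvScanB, hany, j0z]
      · have hany : (ms.any (fun m => PySem.Chars.startswith (c :: rest) m)) = false := by
          rcases Bool.eq_false_or_eq_true (ms.any (fun m => PySem.Chars.startswith (c :: rest) m)) with ht | hf
          · exact absurd ((pvQ_iff_any ms (c :: rest)).mp ht) (by simpa [pvQ] using h0)
          · exact hf
        obtain ⟨j1, rfl⟩ : ∃ j1, j0 = j1 + 1 := by
          cases j0 with
          | zero => exact absurd hq h0
          | succ j1 => exact ⟨j1, rfl⟩
        have hq' : pvQ ms rest j1 := by simpa [pvQ] using hq
        have hmin' : ∀ j < j1, ¬ pvQ ms rest j := by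
          intro j hj hqr
          exact hmin (j + 1) (by omega) (by simpa [pvQ] using hqr)
        have := ih (i + 1) j1 hq' hmin' hnil
        rw [pvScanB]
        simp only [hany, Bool.false_eq_true, if_false]
        rw [this]; push_cast; ring

-- ===== VERDICT (by name: the statement is the Claim_ definition above) =====
theorem compute_history_cutoff_spec : Claim_equal_compute_history_cutoff := by
  intro text _
  unfold Spec_compute_history_cutoff compute_history_cutoff compute_history_cutoff_alt
  dsimp only []
  set s : List Char := PySem.Chars.lower text.toList with hs
  have hms : pvMarkersB.map String.toList = pvMarkersA.map String.toList := rfl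
  set ms : List (List Char) := pvMarkersA.map String.toList with hmsdef
  have hnil : ¬ ∃ m ∈ ms, m <+: ([] : List Char) := by
    simp [hmsdef, pvMarkersA]
  have hfind : ∀ mStr : String, PySem.Str.find (PySem.Str.lower text) mStr
      = PySem.Chars.find s mStr.toList := by
    intro mStr
    simp [hs]
  by_cases hex : ∃ j, pvQ ms s j
  · letI : DecidablePred (pvQ ms s) := fun j => Classical.dec _
    set j0 := Nat.find hex with hj0
    have hqj0 : pvQ ms s j0 := Nat.find_spec hex
    have hminj0 : ∀ j < j0, ¬ pvQ ms s j := fun j hj => Nat.find_min hex hj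
    have hB : pvScanB (pvMarkersB.map String.toList) 0 s = (j0 : Int) := by
      rw [hms]
      have := pvScanB_pos ms s 0 j0 hqj0 hminj0 hnil
      simpa using this
    rw [hB]
    -- now the A side
    obtain ⟨m0, hm0mem, hm0pre⟩ := hqj0
    have hm0inf : PySem.Chars.find s m0 ≠ -1 := by
      rw [PySem.Chars.find_ne_neg_one_iff]
      rw [← PySem.Chars.isIn_iff_infix, ← PySem.Chars.exists_prefix_drop_iff_isIn]
      exact ⟨j0, hm0pre⟩
    have hm0nn : 0 ≤ PySem.Chars.find s m0 := by
      have := PySem.Chars.neg_one_le_find (s := s) (sub := m0)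
      omega
    -- find s m0 ≤ j0
    have hm0le : PySem.Chars.find s m0 ≤ (j0 : Int) := by
      obtain ⟨_, hleast⟩ := PySem.Chars.find_spec (s := s) (sub := m0) hm0nn
      by_contra hgt
      push Not at hgt
      exact hleast j0 (by omega) hm0pre
    -- m0's string form is in pvMarkersA
    obtain ⟨m0s, hm0s, rfl⟩ := List.mem_map.mp hm0mem
    have hm0find : PySem.Str.find (PySem.Str.lower text) m0s ≠ -1 := by
      rw [hfind]; exact hm0inf
    -- indices nonempty: find of m0s is a member
    have hmemIdx : PySem.Str.find (PySem.Str.lower text) m0s ∈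
        (pvMarkersA.filter (fun m => PySem.Str.find (PySem.Str.lower text) m != -1)).map
          (fun m => PySem.Str.find (PySem.Str.lower text) m) := by
      exact List.mem_map.mpr ⟨m0s, List.mem_filter.mpr ⟨hm0s, by simpa using hm0find⟩, rfl⟩
    set indices := (pvMarkersA.filter (fun m => PySem.Str.find (PySem.Str.lower text) m != -1)).map
          (fun m => PySem.Str.find (PySem.Str.lower text) m) with hidx
    have hne : indices ≠ [] := by
      intro h; rw [h] at hmemIdx; exact (List.not_mem_nil) hmemIdx
    obtain ⟨v, hv⟩ : ∃ v, PySem.List.min? indices (fun x => x) = some v := by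
      rcases h : PySem.List.min? indices (fun x => x) with _ | v
      · exact absurd ((PySem.List.min?_eq_none_iff _ _).mp h) hne
      · exact ⟨v, rfl⟩
    have hvmem := PySem.List.min?_mem hv
    have hvmin := PySem.List.min?_isMin hv
    -- v ≤ find m0 ≤ j0
    have hvle : v ≤ (j0 : Int) := le_trans (hvmin _ hmemIdx) (by rw [hfind]; exact hm0le)
    -- v is a find value, so j0 ≤ v
    obtain ⟨ms1, hms1, hveq⟩ := List.mem_map.mp hvmem
    have hms1f := (List.mem_filter.mp hms1).2
    have hvne : v ≠ -1 := by rw [← hveq]; simpa using hms1f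
    have hvfind : v = PySem.Chars.find s ms1.toList := by rw [← hveq, hfind]
    have hvnn : 0 ≤ v := by
      have := PySem.Chars.neg_one_le_find (s := s) (sub := ms1.toList)
      omega
    have hvpre : ms1.toList <+: s.drop v.toNat := by
      rw [hvfind]
      exact (PySem.Chars.find_spec (s := s) (sub := ms1.toList) (by omega)).1
    have hqv : pvQ ms s v.toNat :=
      ⟨ms1.toList, List.mem_map.mpr ⟨ms1, (List.mem_filter.mp hms1).1, rfl⟩, hvpre⟩
    have hj0le : j0 ≤ v.toNat := Nat.find_min' hex hqv
    have : v = (j0 : Int) := by omega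
    simp only [hv, this]
  · push Not at hex
    have hB : pvScanB (pvMarkersB.map String.toList) 0 s = -1 := by
      rw [hms]; exact pvScanB_neg ms s 0 hex
    rw [hB]
    have hallneg : ∀ mStr ∈ pvMarkersA, PySem.Str.find (PySem.Str.lower text) mStr = -1 := by
      intro mStr hmem
      rw [hfind, PySem.Chars.find_eq_neg_one_iff, ← PySem.Chars.isIn_iff_infix,
        ← PySem.Chars.exists_prefix_drop_iff_isIn]
      rintro ⟨j, hj⟩
      exact hex j ⟨mStr.toList, List.mem_map.mpr ⟨mStr, hmem, rfl⟩, hj⟩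
    have hfilter : pvMarkersA.filter (fun m => PySem.Str.find (PySem.Str.lower text) m != -1) = [] := by
      rw [List.filter_eq_nil_iff]
      intro m hm
      have h := hallneg m hm
      rw [hfind] at h
      rw [hs] at h
      simp [h]
    rw [hfilter]
    simp [PySem.List.min?]
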